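-- pv_equiv track=rewrite | github.com/tiankaima/USTC_ALGO_24 | utils/Q14-5_2.py | resolve_pre_order
-- ===== SOURCE A (Python) =====
-- def resolve_pre_order(n, root, i, j):
--     if i < 1 or i > n or j < 1 or j > n or i > j:
--         return []
--         return []
--     if i == j:
--         return [i]
--
--     pre_order = []
--     r = root[i - 1][j - 1]
--     pre_order.append(r)
--     tmp = resolve_pre_order(n, root, i, r - 1)
--     pre_order.extend(tmp)
--     tmp = resolve_pre_order(n, root, r + 1, j)
--     pre_order.extend(tmp)
--     return pre_order
-- ===== SOURCE B (Python) =====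
-- def resolve_pre_order(n, root, i, j):
--     out = []
--     todo = [(i, j)]
--     while todo:
--         lo, hi = todo.pop()
--         if 1 <= lo <= hi <= n:
--             if lo < hi:
--                 r = root[lo - 1][hi - 1]
--                 out.append(r)
--                 todo.append((r + 1, hi))
--                 todo.append((lo, r - 1))
--             else:
--                 out.append(lo)
--     return out
-- ===== Notes on version B (the rewrite author's own statement) =====
-- stated objective: alternative
-- what changed: Replaces the recursive preorder reconstruction with an iterative while-loop over an explicit stack of (lo,hi) intervals, using a positive range guard (1 <= lo <= hi <= n) and pushing right-before-left into one accumulated output list.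
-- outside the precondition, e.g. on resolve_pre_order(2, [[10, 10], [10, 10]], 1, 2): A returns [10], B returns [10]
import Mathlib
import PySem

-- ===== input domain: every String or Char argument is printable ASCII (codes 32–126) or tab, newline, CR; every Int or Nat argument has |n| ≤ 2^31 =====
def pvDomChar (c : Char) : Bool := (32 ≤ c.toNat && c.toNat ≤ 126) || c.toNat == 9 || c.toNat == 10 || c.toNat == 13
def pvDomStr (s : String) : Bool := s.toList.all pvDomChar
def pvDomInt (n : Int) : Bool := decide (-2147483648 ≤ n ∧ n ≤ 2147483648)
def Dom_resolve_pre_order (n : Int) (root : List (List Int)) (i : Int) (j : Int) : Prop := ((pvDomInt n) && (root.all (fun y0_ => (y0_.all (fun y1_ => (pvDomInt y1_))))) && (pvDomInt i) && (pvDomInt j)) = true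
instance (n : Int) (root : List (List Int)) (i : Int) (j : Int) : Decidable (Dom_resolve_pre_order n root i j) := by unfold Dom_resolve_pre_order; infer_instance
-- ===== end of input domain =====

-- B replaces A's recursion by an iterative while-loop over an explicit stack of (lo,hi)
-- intervals with a positive range guard, pushing right-before-left; same return value on Pre_.

-- ===== PORT A =====
-- A's recursion, made total with a fuel guard only (Pre_ guarantees the fuel below suffices)
def goA (fuel : Nat) (n : Int) (root : List (List Int)) (i j : Int) : List Int :=
  match fuel with
  | 0 => []
  | fuel + 1 =>
    if i < 1 ∨ i > n ∨ j < 1 ∨ j > n ∨ i > j then []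
    else if i = j then [i]
    else
      -- root[i-1][j-1]: both indices ≥ 0 after the guard; none = IndexError, excluded by Pre_
      match (PySem.List.pyGet? root (i - 1)).bind (fun row => PySem.List.pyGet? row (j - 1)) with
      | none => []
      | some r => r :: (goA fuel n root i (r - 1) ++ goA fuel n root (r + 1) j)

def resolve_pre_order (n : Int) (root : List (List Int)) (i : Int) (j : Int) : List Int :=
  goA ((j - i).toNat + 1) n root i j

-- ===== PORT B =====
-- B's while-loop: top of `todo` is the list head; fuel guard only (Pre_ makes it sufficient)
def goB (n : Int) (root : List (List Int)) : Nat → List Int → List (Int × Int) → List Int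
  | _, out, [] => out
  | 0, out, _ :: _ => out
  | f + 1, out, (lo, hi) :: rest =>
    if 1 ≤ lo ∧ lo ≤ hi ∧ hi ≤ n then
      if lo < hi then
        -- root[lo-1][hi-1]: indices ≥ 0 under the positive guard; none = IndexError, excluded by Pre_
        match PySem.List.pyGet? root (lo - 1) with
        | none => out
        | some row =>
          match PySem.List.pyGet? row (hi - 1) with
          | none => out
          | some r => goB n root f (out ++ [r]) ((lo, r - 1) :: (r + 1, hi) :: rest)
      else goB n root f (out ++ [lo]) rest
    else goB n root f out rest

def resolve_pre_order_alt (n : Int) (root : List (List Int)) (i : Int) (j : Int) : List Int :=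
  goB n root (2 * (j - i + 1).toNat + 1) [] [(i, j)]

-- ===== PRECONDITION & SPEC =====
-- the cells of root reachable from the interval [I, J] form a valid root table:
-- rows I-1 … J-1 exist, are long enough, and entry (a, b) lies in [a+1, b+1] for a ≤ b
def pvTableOK (root : List (List Int)) (I J : Int) : Prop :=
  J ≤ (root.length : Int) ∧
  ∀ a, a < J.toNat → (I - 1).toNat ≤ a →
    J ≤ ((root.getD a []).length : Int) ∧
    ∀ b, b < J.toNat → a ≤ b →
      (a : Int) + 1 ≤ (root.getD a []).getD b 0 ∧ (root.getD a []).getD b 0 ≤ (b : Int) + 1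

-- Pre_ = the call is trivial (guard fails or i ≥ j), or the part of root it can reach is a
-- well-formed root table. Outside it A raises IndexError or recurses forever on most inputs,
-- and where a stray out-of-range entry still lets A return, that value is accidental (B happens
-- to agree on the cited example).
def Pre_resolve_pre_order (n : Int) (root : List (List Int)) (i : Int) (j : Int) : Prop :=
  i < 1 ∨ i > n ∨ j < 1 ∨ j > n ∨ i ≥ j ∨ pvTableOK root i j
instance (n : Int) (root : List (List Int)) (i : Int) (j : Int) : Decidable (Pre_resolve_pre_order n root i j) := by unfold Pre_resolve_pre_order pvTableOK; infer_instance

def pvWitness_resolve_pre_order : Int × List (List Int) × Int × Int := (2, [[1, 2], [0, 2]], 1, 2)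

def Spec_resolve_pre_order (n : Int) (root : List (List Int)) (i : Int) (j : Int) (out : List Int) : Prop := out = resolve_pre_order_alt n root i j
instance (n : Int) (root : List (List Int)) (i : Int) (j : Int) (out : List Int) : Decidable (Spec_resolve_pre_order n root i j out) := by unfold Spec_resolve_pre_order; infer_instance

-- ===== CLAIM (what is proved, stated in full; the proofs are below) =====
def Claim_equal_resolve_pre_order : Prop := ∀ (n : Int) (root : List (List Int)) (i : Int) (j : Int), Dom_resolve_pre_order n root i j → Pre_resolve_pre_order n root i j → Spec_resolve_pre_order n root i j (resolve_pre_order n root i j)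

-- ===== LEMMAS AND PROOFS =====

-- proof-side name for the shared subscript expression root[i-1][j-1]
def pvLookup (root : List (List Int)) (i j : Int) : Option Int :=
  (PySem.List.pyGet? root (i - 1)).bind (fun row => PySem.List.pyGet? row (j - 1))

lemma goA_succ (fuel : Nat) (n : Int) (root : List (List Int)) (i j : Int) :
    goA (fuel + 1) n root i j =
      (if i < 1 ∨ i > n ∨ j < 1 ∨ j > n ∨ i > j then []
       else if i = j then [i]
       else
         match pvLookup root i j with
         | none => []
         | some r => r :: (goA fuel n root i (r - 1) ++ goA fuel n root (r + 1) j)) := rfl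

lemma lookup_spec {root : List (List Int)} {I J i j : Int}
    (hp : pvTableOK root I J) (hI : I ≤ i) (hJ : j ≤ J) (h1 : 1 ≤ i) (hij : i < j) :
    ∃ r, pvLookup root i j = some r ∧ i ≤ r ∧ r ≤ j := by
  obtain ⟨hlen, hrows⟩ := hp
  have haJ : (i - 1).toNat < J.toNat := by omega
  have haI : (I - 1).toNat ≤ (i - 1).toNat := by omega
  have ha : (i - 1).toNat < root.length := by omega
  have hrow : root.getD (i - 1).toNat [] = root[(i - 1).toNat] := List.getD_eq_getElem _ _ ha
  have hrowlen := (hrows _ haJ haI).1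
  rw [hrow] at hrowlen
  have hb : (j - 1).toNat < root[(i - 1).toNat].length := by omega
  have hent : (root.getD (i - 1).toNat []).getD (j - 1).toNat 0 = root[(i - 1).toNat][(j - 1).toNat] := by
    rw [hrow]; exact List.getD_eq_getElem _ _ hb
  have hval := (hrows _ haJ haI).2 (j - 1).toNat (by omega) (by omega)
  rw [hent] at hval
  refine ⟨root[(i - 1).toNat][(j - 1).toNat], ?_, by omega, by omega⟩
  unfold pvLookup
  rw [PySem.List.pyGet?_of_nonneg root (by omega : (0:Int) ≤ i - 1), List.getElem?_eq_getElem ha,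
    Option.bind_some, PySem.List.pyGet?_of_nonneg _ (by omega : (0:Int) ≤ j - 1),
    List.getElem?_eq_getElem hb]

-- A's fueled recursion is fuel-insensitive once the fuel covers the interval length
lemma goA_canon {n : Int} {root : List (List Int)} {I J : Int} (hp : pvTableOK root I J) :
    ∀ s : Nat, ∀ i j : Int, ∀ fuel : Nat, I ≤ i → j ≤ J → (j - i).toNat = s → s + 1 ≤ fuel →
      goA fuel n root i j = resolve_pre_order n root i j := by
  intro s
  induction s using Nat.strong_induction_on with
  | _ s IH =>
    intro i j fuel hI hJ hs hf
    obtain ⟨f, rfl⟩ : ∃ f, fuel = f + 1 := ⟨fuel - 1, by omega⟩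
    unfold resolve_pre_order
    rw [hs]
    by_cases hg : i < 1 ∨ i > n ∨ j < 1 ∨ j > n ∨ i > j
    · simp [goA, hg]
    · by_cases heq : i = j
      · simp [goA, heq]
      · have h1 : 1 ≤ i := by omega
        have hij : i < j := by omega
        obtain ⟨r, hr, hri, hrj⟩ := lookup_spec hp hI hJ h1 hij
        have hs1 : (r - 1 - i).toNat < s := by omega
        have hs2 : (j - (r + 1)).toNat < s := by omega
        obtain ⟨s', rfl⟩ : ∃ s', s = s' + 1 := ⟨s - 1, by omega⟩
        have e1 : goA f n root i (r - 1) = resolve_pre_order n root i (r - 1) :=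
          IH _ hs1 i (r - 1) f hI (by omega) rfl (by omega)
        have e2 : goA f n root (r + 1) j = resolve_pre_order n root (r + 1) j :=
          IH _ hs2 (r + 1) j f (by omega) hJ rfl (by omega)
        have e1' : goA (s' + 1) n root i (r - 1) = resolve_pre_order n root i (r - 1) :=
          IH _ hs1 i (r - 1) (s' + 1) hI (by omega) rfl (by omega)
        have e2' : goA (s' + 1) n root (r + 1) j = resolve_pre_order n root (r + 1) j :=
          IH _ hs2 (r + 1) j (s' + 1) (by omega) hJ rfl (by omega)
        rw [goA_succ, goA_succ]
        simp only [if_neg hg, if_neg heq, hr]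
        rw [e1, e2, e1', e2']

lemma resolve_guard {n : Int} {root : List (List Int)} {i j : Int}
    (hg : i < 1 ∨ i > n ∨ j < 1 ∨ j > n ∨ i > j) :
    resolve_pre_order n root i j = [] := by
  simp [resolve_pre_order, goA, hg]

lemma resolve_single {n : Int} {root : List (List Int)} {i : Int}
    (h1 : 1 ≤ i) (hn : i ≤ n) :
    resolve_pre_order n root i i = [i] := by
  simp only [resolve_pre_order, goA]
  have hg : ¬ (i < 1 ∨ i > n ∨ i < 1 ∨ i > n ∨ i > i) := by omega
  rw [if_neg hg]
  simp

lemma resolve_step {n : Int} {root : List (List Int)} {I J i j r : Int}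
    (hp : pvTableOK root I J) (hI : I ≤ i) (hJ : j ≤ J)
    (hg : ¬ (i < 1 ∨ i > n ∨ j < 1 ∨ j > n ∨ i > j)) (hij : i < j)
    (hr : pvLookup root i j = some r) (hri : i ≤ r) (hrj : r ≤ j) :
    resolve_pre_order n root i j =
      r :: (resolve_pre_order n root i (r - 1) ++ resolve_pre_order n root (r + 1) j) := by
  have heq : ¬ (i = j) := by omega
  obtain ⟨s', hs⟩ : ∃ s', (j - i).toNat = s' + 1 := ⟨(j - i).toNat - 1, by omega⟩
  unfold resolve_pre_order
  rw [hs]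
  rw [goA_succ]
  simp only [if_neg hg, if_neg heq, hr]
  rw [goA_canon hp (r - 1 - i).toNat i (r - 1) (s' + 1) hI (by omega) rfl (by omega),
    goA_canon hp (j - (r + 1)).toNat (r + 1) j (s' + 1) (by omega) hJ rfl (by omega)]
  rfl

def pvCost (p : Int × Int) : Nat := 2 * (p.2 - p.1 + 1).toNat + 1

lemma goB_spec {n : Int} {root : List (List Int)} {I J : Int} (hp : pvTableOK root I J) :
    ∀ fuel : Nat, ∀ stack : List (Int × Int), ∀ acc : List Int,
      (∀ p ∈ stack, I ≤ p.1 ∧ p.2 ≤ J) →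
      (stack.map pvCost).sum ≤ fuel →
      goB n root fuel acc stack =
        acc ++ (stack.map (fun p => resolve_pre_order n root p.1 p.2)).flatten := by
  intro fuel
  induction fuel with
  | zero =>
    intro stack acc hw hc
    cases stack with
    | nil => simp [goB]
    | cons p rest => simp [pvCost] at hc
  | succ f IH =>
    intro stack acc hw hc
    cases stack with
    | nil => simp [goB]
    | cons p rest =>
      obtain ⟨lo, hi⟩ := p
      have hhead : pvCost (lo, hi) = 2 * (hi - lo + 1).toNat + 1 := rfl
      simp only [List.map_cons, List.sum_cons] at hc
      have hwrest : ∀ p ∈ rest, I ≤ p.1 ∧ p.2 ≤ J := fun p hm => hw p (List.mem_cons_of_mem _ hm)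
      by_cases hpos : 1 ≤ lo ∧ lo ≤ hi ∧ hi ≤ n
      · by_cases hlt : lo < hi
        · have hg : ¬ (lo < 1 ∨ lo > n ∨ hi < 1 ∨ hi > n ∨ lo > hi) := by omega
          have hwin := hw (lo, hi) List.mem_cons_self
          obtain ⟨r, hr, hri, hrj⟩ := lookup_spec hp hwin.1 hwin.2 hpos.1 hlt
          obtain ⟨row, hrow, hcell⟩ := Option.bind_eq_some_iff.mp hr
          simp only [goB, if_pos hpos, if_pos hlt, hrow, hcell]
          have hwnew : ∀ p ∈ ((lo, r - 1) :: (r + 1, hi) :: rest), I ≤ p.1 ∧ p.2 ≤ J := by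
            intro p hm
            rcases hm with _ | ⟨_, hm⟩
            · exact ⟨hwin.1, by omega⟩
            · rcases hm with _ | ⟨_, hm⟩
              · exact ⟨by omega, hwin.2⟩
              · exact hwrest _ (by assumption)
          have hcc : (((lo, r - 1) :: (r + 1, hi) :: rest).map pvCost).sum ≤ f := by
            simp only [List.map_cons, List.sum_cons, pvCost] at *
            omega
          rw [IH _ (acc ++ [r]) hwnew hcc]
          simp only [List.map_cons, List.flatten_cons]
          rw [resolve_step hp hwin.1 hwin.2 hg hlt hr hri hrj]
          simp
        · have heq : lo = hi := by omega
          simp only [goB, if_pos hpos, if_neg hlt]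
          rw [IH rest (acc ++ [lo]) hwrest (by rw [hhead] at hc; omega)]
          subst heq
          simp [resolve_single (by omega : (1:Int) ≤ lo) (by omega : lo ≤ n)]
      · have hg : lo < 1 ∨ lo > n ∨ hi < 1 ∨ hi > n ∨ lo > hi := by omega
        simp only [goB, if_neg hpos]
        rw [IH rest acc hwrest (by rw [hhead] at hc; omega)]
        simp [resolve_guard hg]

lemma alt_easy {n : Int} {root : List (List Int)} {i j : Int}
    (hg : i < 1 ∨ i > n ∨ j < 1 ∨ j > n ∨ i > j) :
    resolve_pre_order_alt n root i j = [] := by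
  have hpos : ¬ (1 ≤ i ∧ i ≤ j ∧ j ≤ n) := by omega
  simp [resolve_pre_order_alt, goB, hpos]

lemma alt_single {n : Int} {root : List (List Int)} {i : Int}
    (h1 : 1 ≤ i) (hn : i ≤ n) :
    resolve_pre_order_alt n root i i = [i] := by
  have hpos : 1 ≤ i ∧ i ≤ i ∧ i ≤ n := by omega
  have hlt : ¬ (i < i) := by omega
  simp only [resolve_pre_order_alt, goB]
  rw [if_pos hpos, if_neg hlt]
  simp

-- ===== VERDICT (by name: the statement is the Claim_ definition above) =====
theorem resolve_pre_order_spec : Claim_equal_resolve_pre_order := by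
  intro n root i j _hd hp
  unfold Spec_resolve_pre_order
  by_cases hg : i < 1 ∨ i > n ∨ j < 1 ∨ j > n ∨ i > j
  · rw [resolve_guard hg, alt_easy hg]
  · by_cases heq : i = j
    · subst heq
      rw [resolve_single (by omega) (by omega), alt_single (by omega) (by omega)]
    · have htab : pvTableOK root i j := by
        unfold Pre_resolve_pre_order at hp
        rcases hp with h | h | h | h | h | h
        · omega
        · omega
        · omega
        · omega
        · omega
        · exact h
      unfold resolve_pre_order_alt
      rw [goB_spec htab _ [(i, j)] [] (by intro p hm; simp at hm; simp [hm])
        (by simp [pvCost])]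
      simp
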